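-- pv_equiv track=rewrite | github.com/aliceriot/projecteuler | python/problem19.py | year_chop
-- ===== SOURCE A (Python) =====
-- def year_chop(big_list):
--     start = 0
--     end = 365
--     years = {}
--     for year in range(1900,2001):
--         if year % 100 == 0:
--             if year % 400 == 0:
--                 end += 1
--                 years[year] = big_list[start:end]
--                 start += 366
--                 end += 365
--             else:
--                 years[year] = big_list[start:end]
--                 start += 365
--                 end += 365
--         else:
--             if year % 4 == 0:
--                 end += 1
--                 years[year] = big_list[start:end]
--                 start += 366
--                 end += 365
--             else:
--                 years[year] = big_list[start:end]
--                 start += 365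
--                 end += 365
--     return years
-- ===== SOURCE B (Python) =====
-- def year_chop(big_list):
--     lengths = [366 if y % 4 == 0 and (y % 100 != 0 or y % 400 == 0) else 365
--                for y in range(1900, 2001)]
--     bounds = [0]
--     for l in lengths:
--         bounds.append(bounds[-1] + l)
--     return {year: big_list[bounds[i]:bounds[i + 1]]
--             for i, year in enumerate(range(1900, 2001))}
-- ===== Notes on version B (the rewrite author's own statement) =====
-- stated objective: simpler
-- what changed: Replaced A's two-cursor start/end state machine with four duplicated slicing branches by a table-then-pass structure: a per-year length list from the standard leap-year predicate, a cumulative boundary table, and one dict comprehension slicing between consecutive boundaries.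
import Mathlib
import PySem

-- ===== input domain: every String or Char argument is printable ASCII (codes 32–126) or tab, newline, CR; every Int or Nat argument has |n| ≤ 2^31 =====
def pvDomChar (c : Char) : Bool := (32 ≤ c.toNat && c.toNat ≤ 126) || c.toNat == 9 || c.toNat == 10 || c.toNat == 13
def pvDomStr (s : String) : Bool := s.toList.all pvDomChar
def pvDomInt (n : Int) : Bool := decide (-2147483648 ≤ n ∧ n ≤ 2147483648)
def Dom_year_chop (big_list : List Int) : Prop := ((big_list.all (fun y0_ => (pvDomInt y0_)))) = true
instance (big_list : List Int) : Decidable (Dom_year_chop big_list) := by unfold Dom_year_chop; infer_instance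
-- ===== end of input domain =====

-- B replaces A's two-cursor start/end state machine (four duplicated slicing branches) by a
-- length-table + cumulative-boundary-table + one slicing pass; objective: simpler structure, same cost.

-- ===== PORT A =====
-- the body of A's for-loop, carrying (start, end, years); branches in A's order
def yearChopStep (big_list : List Int) (st : Int × Int × PySem.Dict Int (List Int)) (year : Int) :
    Int × Int × PySem.Dict Int (List Int) :=
  let start := st.1
  let e := st.2.1
  let years := st.2.2
  if year % 100 == 0 then
    if year % 400 == 0 then
      (start + 366, (e + 1) + 365,
        years.insert year (PySem.List.slice big_list (some start) (some (e + 1))))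
    else
      (start + 365, e + 365,
        years.insert year (PySem.List.slice big_list (some start) (some e)))
  else
    if year % 4 == 0 then
      (start + 366, (e + 1) + 365,
        years.insert year (PySem.List.slice big_list (some start) (some (e + 1))))
    else
      (start + 365, e + 365,
        years.insert year (PySem.List.slice big_list (some start) (some e)))

def year_chop (big_list : List Int) : List (Int × List Int) :=
  ((PySem.List.pyRange 1900 2001 1).foldl (yearChopStep big_list)
    (0, 365, PySem.Dict.empty)).2.2.items

-- ===== PORT B =====
-- B's leap-year length: 366 if y % 4 == 0 and (y % 100 != 0 or y % 400 == 0) else 365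
def pyLen (y : Int) : Int :=
  if y % 4 == 0 && (y % 100 != 0 || y % 400 == 0) then 366 else 365

def year_chop_alt (big_list : List Int) : List (Int × List Int) :=
  let lengths := (PySem.List.pyRange 1900 2001 1).map pyLen
  -- bounds[-1] is pyGetD bounds (-1); the indices bounds[i], bounds[i+1] below are provably in
  -- range, so Python's plain indexing is ported as pyGetD with an unreachable default
  let bounds := lengths.foldl (fun bs l => bs ++ [PySem.List.pyGetD bs (-1) 0 + l]) ([0] : List Int)
  (PySem.List.enumerate (PySem.List.pyRange 1900 2001 1) 0).map
    (fun p => (p.2, PySem.List.slice big_list (some (PySem.List.pyGetD bounds p.1 0))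
                                              (some (PySem.List.pyGetD bounds (p.1 + 1) 0))))

-- ===== PRECONDITION & SPEC =====
def Spec_year_chop (big_list : List Int) (out : List (Int × List Int)) : Prop := out = year_chop_alt big_list
instance (big_list : List Int) (out : List (Int × List Int)) : Decidable (Spec_year_chop big_list out) := by unfold Spec_year_chop; infer_instance

-- ===== CLAIM (what is proved, stated in full; the proofs are below) =====
def Claim_equal_year_chop : Prop := ∀ (big_list : List Int), Dom_year_chop big_list → Spec_year_chop big_list (year_chop big_list)

-- ===== LEMMAS AND PROOFS =====

-- common normal form: the year list chopped into consecutive slices of length pyLen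
def chopFrom (bl : List Int) : List Int → Int → List (Int × List Int)
  | [], _ => []
  | y :: ys, s =>
      (y, PySem.List.slice bl (some s) (some (s + pyLen y))) :: chopFrom bl ys (s + pyLen y)

-- one step of A's loop, from a state satisfying the invariant end = start + 365
theorem stepA_eq (bl : List Int) (s : Int) (d : PySem.Dict Int (List Int)) (y : Int) :
    yearChopStep bl (s, s + 365, d) y =
      (s + pyLen y, (s + pyLen y) + 365,
        d.insert y (PySem.List.slice bl (some s) (some (s + pyLen y)))) := by
  have h1 : s + 365 + 1 = s + 366 := by ring
  unfold yearChopStep pyLen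
  by_cases h100 : y % 100 = 0
  · by_cases h400 : y % 400 = 0
    · have h4 : y % 4 = 0 := by omega
      simp [h100, h400, h4, h1]
    · simp [h100, h400]
  · by_cases h4 : y % 4 = 0
    · simp [h100, h4, h1]
    · simp [h100, h4]

theorem foldA_items (bl : List Int) : ∀ (ys : List Int) (s : Int) (d : PySem.Dict Int (List Int)),
    ys.Nodup → (∀ y ∈ ys, d.contains y = false) →
    ((ys.foldl (yearChopStep bl) (s, s + 365, d)).2.2).items = d.items ++ chopFrom bl ys s := by
  intro ys
  induction ys with
  | nil => intro s d _ _; simp [chopFrom]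
  | cons y ys ih =>
    intro s d hnd hc
    simp only [List.foldl_cons]
    rw [stepA_eq]
    rw [ih (s + pyLen y) _ (List.Nodup.of_cons hnd) ?_]
    · rw [PySem.Dict.items_insert_of_not_contains d _ (hc y (by simp))]
      simp [chopFrom]
    · intro z hz
      rw [PySem.Dict.contains_insert]
      have hzy : z ≠ y := by
        rintro rfl; exact (List.nodup_cons.mp hnd).1 hz
      simp [hzy, hc z (List.mem_cons_of_mem _ hz)]

theorem yearA (bl : List Int) :
    year_chop bl = chopFrom bl (PySem.List.pyRange 1900 2001 1) 0 := by
  unfold year_chop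
  rw [show ((0 : Int), (365 : Int), (PySem.Dict.empty : PySem.Dict Int (List Int)))
        = ((0 : Int), (0 : Int) + 365, PySem.Dict.empty) by norm_num]
  rw [foldA_items bl _ 0 _ (PySem.List.nodup_pyRange_one 1900 2001)
        (fun y _ => PySem.Dict.contains_empty y)]
  simp [PySem.Dict.empty]

-- B's cumulative-boundary fold is a scanl
def csList (s : Int) : List Int → List Int
  | [] => [s]
  | l :: ls => s :: csList (s + l) ls

theorem bounds_eq : ∀ (ls bs : List Int) (s : Int),
    ls.foldl (fun bs l => bs ++ [PySem.List.pyGetD bs (-1) 0 + l]) (bs ++ [s])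
      = bs ++ csList s ls := by
  intro ls
  induction ls with
  | nil => intro bs s; simp [csList]
  | cons l ls ih =>
    intro bs s
    simp only [List.foldl_cons, PySem.List.pyGetD_neg_one_append_singleton]
    rw [ih (bs ++ [s]) (s + l)]
    simp [csList]

theorem csList_get : ∀ (ls : List Int) (s : Int) (k : Nat), k ≤ ls.length →
    (csList s ls)[k]? = some (s + (ls.take k).sum) := by
  intro ls
  induction ls with
  | nil =>
    intro s k hk
    have hk0 : k = 0 := by simpa using hk
    subst hk0
    simp [csList]
  | cons l ls ih =>
    intro s k hk
    match k with
    | 0 => simp [csList]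
    | Nat.succ k =>
      have : (csList s (l :: ls))[k + 1]? = (csList (s + l) ls)[k]? := by simp [csList]
      rw [this, ih (s + l) k (by simpa using hk)]
      simp [List.sum_cons]
      ring_nf

theorem chop_get (bl : List Int) : ∀ (ys : List Int) (s : Int) (k : Nat),
    (chopFrom bl ys s)[k]? = ys[k]?.map (fun v =>
      (v, PySem.List.slice bl (some (s + ((ys.take k).map pyLen).sum))
                              (some (s + ((ys.take (k + 1)).map pyLen).sum)))) := by
  intro ys
  induction ys with
  | nil => intro s k; simp [chopFrom]
  | cons y ys ih =>
    intro s k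
    match k with
    | 0 => simp [chopFrom]
    | Nat.succ k =>
      have hL : (chopFrom bl (y :: ys) s)[k + 1]? = (chopFrom bl ys (s + pyLen y))[k]? := by
        simp [chopFrom]
      rw [hL, ih (s + pyLen y) k]
      cases hy : ys[k]? with
      | none => simp [hy]
      | some v => simp [hy, add_assoc]

theorem yearB (bl : List Int) :
    year_chop_alt bl = chopFrom bl (PySem.List.pyRange 1900 2001 1) 0 := by
  unfold year_chop_alt
  simp only []
  rw [show ([0] : List Int) = [] ++ [0] from rfl,
      bounds_eq ((PySem.List.pyRange 1900 2001 1).map pyLen) [] 0, List.nil_append]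
  apply List.ext_getElem?
  intro k
  rw [List.getElem?_map, PySem.List.getElem?_enumerate, chop_get]
  cases hy : (PySem.List.pyRange 1900 2001 1)[k]? with
  | none => simp
  | some v =>
    have hk : k < (PySem.List.pyRange 1900 2001 1).length :=
      List.getElem?_eq_some_iff.mp hy |>.1
    have hlen : ((PySem.List.pyRange 1900 2001 1).map pyLen).length
        = (PySem.List.pyRange 1900 2001 1).length := by simp
    have e1 : PySem.List.pyGetD (csList 0 ((PySem.List.pyRange 1900 2001 1).map pyLen))
        ((0 : Int) + (k : Int)) 0
        = 0 + (((PySem.List.pyRange 1900 2001 1).take k).map pyLen).sum := by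
      rw [PySem.List.pyGetD_of_nonneg _ _ (by positivity)]
      rw [List.getD_eq_getElem?_getD]
      rw [show ((0 : Int) + (k : Int)).toNat = k by omega]
      rw [csList_get _ 0 k (by omega)]
      simp [List.map_take]
    have e2 : PySem.List.pyGetD (csList 0 ((PySem.List.pyRange 1900 2001 1).map pyLen))
        ((0 : Int) + (k : Int) + 1) 0
        = 0 + (((PySem.List.pyRange 1900 2001 1).take (k + 1)).map pyLen).sum := by
      rw [PySem.List.pyGetD_of_nonneg _ _ (by positivity)]
      rw [List.getD_eq_getElem?_getD]
      rw [show ((0 : Int) + (k : Int) + 1).toNat = k + 1 by omega]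
      rw [csList_get _ 0 (k + 1) (by omega)]
      simp [List.map_take]
    simp only [Option.map_some]
    rw [e1, e2]

-- ===== VERDICT (by name: the statement is the Claim_ definition above) =====
theorem year_chop_spec : Claim_equal_year_chop := by
  intro bl _
  show year_chop bl = year_chop_alt bl
  rw [yearA, yearB]
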